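-- pv_equiv track=rewrite | github.com/iTaxoTools/Decontaminator | Utils.py | get_index_in_list
-- ===== SOURCE A (Python) =====
-- def get_index_in_list(value, list):
--     index = -1
--     for idx,x in enumerate(list):
--         if value in x:
--             index = idx
--
--     if index == -1:
--         return None
--
--     else:
--         return index
-- ===== SOURCE B (Python) =====
-- def get_index_in_list(value, list):
--     for idx in range(len(list) - 1, -1, -1):
--         if value in list[idx]:
--             return idx
--     return None
-- ===== Notes on version B (the rewrite author's own statement) =====
-- stated objective: idiomatic
-- what changed: Replaces the forward scan that overwrites an accumulator on every match (then post-checks a -1 sentinel) with a reverse index scan that returns early at the first match, so no sentinel or full traversal is needed.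
import Mathlib
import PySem

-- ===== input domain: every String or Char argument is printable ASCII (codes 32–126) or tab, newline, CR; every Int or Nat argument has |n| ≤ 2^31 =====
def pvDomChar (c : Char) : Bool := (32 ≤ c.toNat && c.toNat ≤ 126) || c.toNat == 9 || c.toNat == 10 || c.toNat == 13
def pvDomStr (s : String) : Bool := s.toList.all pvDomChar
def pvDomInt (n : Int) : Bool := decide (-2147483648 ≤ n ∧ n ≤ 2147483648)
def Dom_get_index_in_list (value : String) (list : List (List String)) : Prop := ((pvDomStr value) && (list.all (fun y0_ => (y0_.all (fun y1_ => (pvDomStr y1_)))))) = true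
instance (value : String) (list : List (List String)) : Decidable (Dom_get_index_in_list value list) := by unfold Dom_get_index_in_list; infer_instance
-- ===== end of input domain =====

-- B replaces A's forward accumulator-overwriting scan (with a -1 sentinel) by an
-- early-exit reverse index scan; same return value, different control-flow shape.

-- ===== PORT A =====
def get_index_in_list (value : String) (list : List (List String)) : Option Int :=
  let index : Int :=
    (PySem.List.enumerate list 0).foldl
      (fun index p => if value ∈ p.2 then p.1 else index) (-1)
  if index = -1 then none else some index

-- ===== PORT B =====
-- loop 'for idx in range(len(list)-1, -1, -1)': recursion on the (index+1) counter
def altGo (value : String) (list : List (List String)) : Nat → Option Int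
  | 0 => none
  | n + 1 => if value ∈ list.getD n [] then some (n : Int) else altGo value list n

def get_index_in_list_alt (value : String) (list : List (List String)) : Option Int :=
  altGo value list list.length

-- ===== PRECONDITION & SPEC =====
def Spec_get_index_in_list (value : String) (list : List (List String)) (out : Option Int) : Prop := out = get_index_in_list_alt value list
instance (value : String) (list : List (List String)) (out : Option Int) : Decidable (Spec_get_index_in_list value list out) := by unfold Spec_get_index_in_list; infer_instance

-- ===== CLAIM (what is proved, stated in full; the proofs are below) =====
def Claim_equal_get_index_in_list : Prop := ∀ (value : String) (list : List (List String)), Dom_get_index_in_list value list → Spec_get_index_in_list value list (get_index_in_list value list)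

-- ===== LEMMAS AND PROOFS =====

-- ===== VERDICT (by name: the statement is the Claim_ definition above) =====
lemma altGo_append (value : String) (l : List (List String)) (x : List String) :
    ∀ k, k ≤ l.length → altGo value (l ++ [x]) k = altGo value l k := by
  intro k hk
  induction k with
  | zero => rfl
  | succ n ih =>
    have hn : n < l.length := by omega
    have hget : (l ++ [x])[n]? = l[n]? := List.getElem?_append_left hn
    simp [altGo, List.getD, hget, ih (by omega)]

lemma foldA_append (value : String) (l : List (List String)) (x : List String) (a : Int) :
    (PySem.List.enumerate (l ++ [x]) 0).foldl
        (fun index p => if value ∈ p.2 then p.1 else index) a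
      = (if value ∈ x then (l.length : Int)
         else (PySem.List.enumerate l 0).foldl
            (fun index p => if value ∈ p.2 then p.1 else index) a) := by
  rw [PySem.List.enumerate_append]
  simp [List.foldl_append, PySem.List.enumerate]

lemma main_eq (value : String) (list : List (List String)) :
    get_index_in_list value list = get_index_in_list_alt value list := by
  induction list using List.reverseRecOn with
  | nil => rfl
  | append_singleton l x ih =>
    simp only [get_index_in_list, get_index_in_list_alt] at ih ⊢
    rw [foldA_append]
    have hlen : (l ++ [x]).length = l.length + 1 := by simp
    rw [hlen]
    by_cases hx : value ∈ x
    · have : ((l.length : Int)) ≠ -1 := by omega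
      simp [hx, altGo, List.getD, this]
    · simp only [hx, if_false]
      rw [show altGo value (l ++ [x]) (l.length + 1)
            = if value ∈ (l ++ [x]).getD l.length [] then some (l.length : Int)
              else altGo value (l ++ [x]) l.length from rfl]
      have hget : (l ++ [x]).getD l.length [] = x := by
        simp [List.getD]
      rw [hget, if_neg hx, altGo_append value l x l.length (le_refl _)]
      exact ih

theorem get_index_in_list_spec : Claim_equal_get_index_in_list :=
  fun value list _ => main_eq value list
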